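-- pv_equiv track=rewrite | github.com/Guardefi/landing1.2 | Desktop/Scorpius-main/fix_indentation_and_brackets.py | fix_bracket_mismatches
-- ===== SOURCE A (Python) =====
-- def fix_bracket_mismatches(content):
--     """Fix bracket and parenthesis mismatches"""
--     lines = content.split('\n')
--     fixed_lines = []
--     bracket_stack = []
--
--     for line_num, line in enumerate(lines):
--         original_line = line
--
--         # Track brackets for context
--         for char in line:
--             if char in '([{':
--                 bracket_stack.append((char, line_num))
--             elif char in ')]}':
--                 if bracket_stack and ((char == ')' and bracket_stack[-1][0] == '(') or
--                                       (char == ']' and bracket_stack[-1][0] == '[') or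
--                                       (char == '}' and bracket_stack[-1][0] == '{')):
--                     bracket_stack.pop()
--
--         # Fix common patterns
--         fixed_line = line
--
--         # Fix closing bracket mismatches
--         if line.strip(
--         ) == '}' and bracket_stack and bracket_stack[-1][0] == '[':
--             fixed_line = line.replace('}', ']')
--         elif line.strip() == ']' and bracket_stack and bracket_stack[-1][0] == '{':
--             fixed_line = line.replace(']', '}')
--         elif line.strip() == '},' and bracket_stack and bracket_stack[-1][0] == '[':
--             fixed_line = line.replace('},', '],')
--         elif line.strip() == '],' and bracket_stack and bracket_stack[-1][0] == '{':
--             fixed_line = line.replace('],', '},')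
--
--         fixed_lines.append(fixed_line)
--
--     return '\n'.join(fixed_lines)
-- ===== SOURCE B (Python) =====
-- def fix_bracket_mismatches(content):
--     """Fix bracket and parenthesis mismatches (single character-stream state machine)"""
--     result = []
--     stack = []
--     buf = []
--
--     def flush():
--         line = ''.join(buf)
--         s = line.strip()
--         top = stack[-1] if stack else ''
--         if s == '}' and top == '[':
--             line = line.replace('}', ']')
--         elif s == ']' and top == '{':
--             line = line.replace(']', '}')
--         elif s == '},' and top == '[':
--             line = line.replace('},', '],')
--         elif s == '],' and top == '{':
--             line = line.replace('],', '},')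
--         result.append(line)
--
--     for ch in content:
--         if ch == '\n':
--             flush()
--             buf.clear()
--         else:
--             buf.append(ch)
--             if ch in '([{':
--                 stack.append(ch)
--             elif ch in ')]}' and stack and stack[-1] + ch in ('()', '[]', '{}'):
--                 stack.pop()
--     flush()
--     return '\n'.join(result)
-- ===== Notes on version B (the rewrite author's own statement) =====
-- stated objective: alternative
-- what changed: B does not split the text into lines at all: it is a single character-stream state machine that scans content once, maintains a plain char stack, accumulates the current line in a buffer, and on each newline (and at end) flushes the buffer through the fixing rule directly into the output, whereas A splits into lines and runs a nested per-line character loop over an enumerate'd line list with a (char,line_num) stack.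
import Mathlib
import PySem

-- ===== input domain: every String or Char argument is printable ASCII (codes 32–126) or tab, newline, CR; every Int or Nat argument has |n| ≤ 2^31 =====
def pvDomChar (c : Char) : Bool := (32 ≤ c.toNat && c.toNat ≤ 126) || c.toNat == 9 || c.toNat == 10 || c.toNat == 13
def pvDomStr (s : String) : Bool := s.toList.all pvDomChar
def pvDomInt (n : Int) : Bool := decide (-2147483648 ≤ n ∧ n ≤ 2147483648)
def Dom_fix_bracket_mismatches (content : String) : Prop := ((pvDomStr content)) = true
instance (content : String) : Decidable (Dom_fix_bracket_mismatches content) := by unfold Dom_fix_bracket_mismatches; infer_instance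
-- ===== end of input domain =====

-- B replaces A's split-into-lines + nested per-line loops by a single character-stream
-- state machine that flushes a line buffer through the fixing rule at each newline
-- (objective: alternative; same values).

-- ===== PORT A =====
-- stack represented head-first (head = Python's bracket_stack[-1])
def pvStepA (ln : Int) (st : List (Char × Int)) (c : Char) : List (Char × Int) :=
  if c = '(' ∨ c = '[' ∨ c = '{' then (c, ln) :: st
  else if c = ')' ∨ c = ']' ∨ c = '}' then
    match st with
    | (t, m) :: rest =>
        if (c = ')' ∧ t = '(') ∨ (c = ']' ∧ t = '[') ∨ (c = '}' ∧ t = '{') then rest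
        else (t, m) :: rest
    | [] => []
  else st

def pvFixA (st : List (Char × Int)) (line : List Char) : List Char :=
  let s := PySem.Chars.strip line
  if s = ['}'] ∧ (st.map Prod.fst).head? = some '[' then PySem.Chars.replace line ['}'] [']']
  else if s = [']'] ∧ (st.map Prod.fst).head? = some '{' then PySem.Chars.replace line [']'] ['}']
  else if s = ['}', ','] ∧ (st.map Prod.fst).head? = some '[' then PySem.Chars.replace line ['}', ','] [']', ',']
  else if s = [']', ','] ∧ (st.map Prod.fst).head? = some '{' then PySem.Chars.replace line [']', ','] ['}', ',']
  else line

def fix_bracket_mismatches (content : String) : String :=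
  let lines := (PySem.Chars.split? content.toList ['\n']).getD []
  let r := (PySem.List.enumerate lines).foldl
      (fun (s : List (List Char) × List (Char × Int)) p =>
        let st := p.2.foldl (pvStepA p.1) s.2
        (s.1 ++ [pvFixA st p.2], st))
      ([], [])
  String.ofList (PySem.Chars.join ['\n'] r.1)

-- ===== PORT B =====
-- flush: apply the fixing rule to the buffered line given the current stack top ('' sentinel → none)
def pvRuleB (st : List Char) (line : List Char) : List Char :=
  let s := PySem.Chars.strip line
  if s = ['}'] ∧ st.head? = some '[' then PySem.Chars.replace line ['}'] [']']
  else if s = [']'] ∧ st.head? = some '{' then PySem.Chars.replace line [']'] ['}']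
  else if s = ['}', ','] ∧ st.head? = some '[' then PySem.Chars.replace line ['}', ','] [']', ',']
  else if s = [']', ','] ∧ st.head? = some '{' then PySem.Chars.replace line [']', ','] ['}', ',']
  else line

-- one character of B's state machine; state = (result lines, stack, line buffer)
def pvStepC (s : List (List Char) × List Char × List Char) (c : Char) : List (List Char) × List Char × List Char :=
  if c = '\n' then (s.1 ++ [pvRuleB s.2.1 s.2.2], s.2.1, [])
  else
    let buf := s.2.2 ++ [c]
    if c = '(' ∨ c = '[' ∨ c = '{' then (s.1, c :: s.2.1, buf)
    else if c = ')' ∨ c = ']' ∨ c = '}' then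
      match s.2.1 with
      | t :: rest =>
          if (t = '(' ∧ c = ')') ∨ (t = '[' ∧ c = ']') ∨ (t = '{' ∧ c = '}') then (s.1, rest, buf)
          else (s.1, t :: rest, buf)
      | [] => (s.1, [], buf)
    else (s.1, s.2.1, buf)

def fix_bracket_mismatches_alt (content : String) : String :=
  let r := content.toList.foldl pvStepC ([], [], [])
  String.ofList (PySem.Chars.join ['\n'] (r.1 ++ [pvRuleB r.2.1 r.2.2]))

-- ===== PRECONDITION & SPEC =====
def Spec_fix_bracket_mismatches (content : String) (out : String) : Prop := out = fix_bracket_mismatches_alt content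
instance (content : String) (out : String) : Decidable (Spec_fix_bracket_mismatches content out) := by unfold Spec_fix_bracket_mismatches; infer_instance

-- ===== CLAIM (what is proved, stated in full; the proofs are below) =====
def Claim_equal_fix_bracket_mismatches : Prop := ∀ (content : String), Dom_fix_bracket_mismatches content → Spec_fix_bracket_mismatches content (fix_bracket_mismatches content)

-- ===== LEMMAS AND PROOFS =====

-- plain char stack step (A's stack with line numbers erased)
def pvStepB (st : List Char) (c : Char) : List Char :=
  if c = '(' ∨ c = '[' ∨ c = '{' then c :: st
  else if c = ')' ∨ c = ']' ∨ c = '}' then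
    match st with
    | t :: rest =>
        if (c = ')' ∧ t = '(') ∨ (c = ']' ∧ t = '[') ∨ (c = '}' ∧ t = '{') then rest
        else t :: rest
    | [] => []
  else st

-- structural split on '\n'
def pvSplit1 : List Char → List (List Char)
  | [] => [[]]
  | c :: cs =>
      if c = '\n' then [] :: pvSplit1 cs
      else match pvSplit1 cs with
        | [] => [[c]]
        | h :: t => (c :: h) :: t

-- A's per-line processing with a plain char stack
def pvProcL (st : List Char) : List (List Char) → List (List Char)
  | [] => []
  | l :: ls =>
      let st' := l.foldl pvStepB st
      pvRuleB st' l :: pvProcL st' ls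

-- B's char-stream processing with a pending buffer (stack already includes the buffer)
def pvProcP (st : List Char) (buf : List Char) : List Char → List (List Char)
  | [] => [pvRuleB st buf]
  | c :: cs =>
      if c = '\n' then pvRuleB st buf :: pvProcP st [] cs
      else pvProcP (pvStepB st c) (buf ++ [c]) cs

lemma stepA_map_fst (ln : Int) (st : List (Char × Int)) (c : Char) :
    (pvStepA ln st c).map Prod.fst = pvStepB (st.map Prod.fst) c := by
  cases st with
  | nil => simp [pvStepA, pvStepB]; split_ifs <;> simp
  | cons h t =>
    simp only [pvStepA, pvStepB, List.map_cons]
    split_ifs <;> simp_all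

lemma foldl_stepA_map_fst (l : List Char) (ln : Int) (st : List (Char × Int)) :
    (l.foldl (pvStepA ln) st).map Prod.fst = l.foldl pvStepB (st.map Prod.fst) := by
  induction l generalizing st with
  | nil => rfl
  | cons c cs ih => simp [List.foldl_cons, ih, stepA_map_fst]

lemma fixA_eq_ruleB (st : List (Char × Int)) (line : List Char) :
    pvFixA st line = pvRuleB (st.map Prod.fst) line := rfl

-- A's enumerate-fold computes pvProcL
lemma a_fold_eq_procL (lines : List (List Char)) (n : Int) (acc : List (List Char)) (st : List (Char × Int)) :
    ((PySem.List.enumerate lines n).foldl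
      (fun (s : List (List Char) × List (Char × Int)) p =>
        let st := p.2.foldl (pvStepA p.1) s.2
        (s.1 ++ [pvFixA st p.2], st)) (acc, st)).1
    = acc ++ pvProcL (st.map Prod.fst) lines := by
  induction lines generalizing n acc st with
  | nil => simp [PySem.List.enumerate_nil, pvProcL]
  | cons l ls ih =>
    rw [PySem.List.enumerate_cons, List.foldl_cons]
    simp only [pvProcL]
    rw [ih]
    simp [fixA_eq_ruleB, foldl_stepA_map_fst]

-- B's char-fold computes pvProcP
lemma b_fold_eq_procP (cs : List Char) (res : List (List Char)) (st buf : List Char) :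
    (cs.foldl pvStepC (res, st, buf)).1 ++ [pvRuleB (cs.foldl pvStepC (res, st, buf)).2.1 (cs.foldl pvStepC (res, st, buf)).2.2]
    = res ++ pvProcP st buf cs := by
  induction cs generalizing res st buf with
  | nil => simp [pvProcP]
  | cons c cs ih =>
    rw [List.foldl_cons]
    by_cases h : c = '\n'
    · subst h
      simp only [pvProcP, pvStepC, reduceIte]
      rw [ih]
      simp
    · have hstep : pvStepC (res, st, buf) c = (res, pvStepB st c, buf ++ [c]) := by
        cases st with
        | nil => simp only [pvStepC, pvStepB, if_neg h]; split_ifs <;> rfl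
        | cons t r =>
          simp only [pvStepC, pvStepB, if_neg h]
          split_ifs <;> first | rfl | tauto
      rw [hstep, ih]
      simp [pvProcP, h]

lemma split1_ne_nil (cs : List Char) : pvSplit1 cs ≠ [] := by
  cases cs with
  | nil => simp [pvSplit1]
  | cons c cs =>
    simp only [pvSplit1]
    split_ifs
    · simp
    · cases h : pvSplit1 cs <;> simp

-- PySem's splitOn on a single-char separator is pvSplit1
lemma splitOn_go_spec (fuel : Nat) (l cur : List Char) (acc : List (List Char)) (h : l.length < fuel) :
    PySem.Chars.splitOn.go ['\n'] fuel l cur acc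
    = acc.reverse ++ (match pvSplit1 l with
        | [] => []
        | hd :: t => (cur.reverse ++ hd) :: t) := by
  induction fuel generalizing l cur acc with
  | zero => omega
  | succ fuel ih =>
    cases l with
    | nil => simp [PySem.Chars.splitOn.go, pvSplit1]
    | cons c rest =>
      by_cases hc : c = '\n'
      · subst hc
        have hpre : List.isPrefixOf ['\n'] ('\n' :: rest) = true := by simp [List.isPrefixOf]
        rw [PySem.Chars.splitOn.go, if_pos hpre]
        have hdrop : List.drop (['\n'] : List Char).length ('\n' :: rest) = rest := rfl
        rw [hdrop]
        rw [ih rest [] ((cur.reverse) :: acc) (by simpa using Nat.lt_of_succ_lt_succ h)]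
        simp only [pvSplit1]
        cases hs : pvSplit1 rest with
        | nil => exact absurd hs (split1_ne_nil rest)
        | cons hd t => simp
      · have hpre : List.isPrefixOf ['\n'] (c :: rest) = false := by
          simp [List.isPrefixOf]; exact fun hh => absurd hh.symm hc
        rw [PySem.Chars.splitOn.go, if_neg (by simp [hpre])]
        rw [ih rest (c :: cur) acc (by simpa using Nat.lt_of_succ_lt_succ h)]
        simp only [pvSplit1, if_neg hc]
        cases hs : pvSplit1 rest with
        | nil => exact absurd hs (split1_ne_nil rest)
        | cons hd t => simp

lemma splitOn_eq_split1 (cs : List Char) :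
    PySem.Chars.splitOn cs ['\n'] = pvSplit1 cs := by
  unfold PySem.Chars.splitOn
  rw [splitOn_go_spec (cs.length + 1) cs [] [] (by omega)]
  cases hs : pvSplit1 cs with
  | nil => exact absurd hs (split1_ne_nil cs)
  | cons hd t => simp

-- the bridge: B's pending-buffer processing = A's per-line processing of the split
lemma procP_eq_procL_split (cs : List Char) (st buf : List Char) :
    pvProcP st buf cs
    = (match pvSplit1 cs with
        | [] => []
        | h :: t => pvRuleB (h.foldl pvStepB st) (buf ++ h) :: pvProcL (h.foldl pvStepB st) t) := by
  induction cs generalizing st buf with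
  | nil => simp [pvProcP, pvSplit1, pvProcL]
  | cons c cs ih =>
    by_cases hc : c = '\n'
    · subst hc
      simp only [pvProcP, pvSplit1]
      rw [ih]
      cases hs : pvSplit1 cs with
      | nil => exact absurd hs (split1_ne_nil cs)
      | cons hd t => simp [pvProcL]
    · simp only [pvProcP, if_neg hc, pvSplit1]
      rw [ih]
      cases hs : pvSplit1 cs with
      | nil => exact absurd hs (split1_ne_nil cs)
      | cons hd t => simp

lemma procL_eq_procP (cs : List Char) :
    pvProcL [] (pvSplit1 cs) = pvProcP [] [] cs := by
  rw [procP_eq_procL_split]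
  cases hs : pvSplit1 cs with
  | nil => exact absurd hs (split1_ne_nil cs)
  | cons hd t => simp [pvProcL]

-- ===== VERDICT (by name: the statement is the Claim_ definition above) =====
theorem fix_bracket_mismatches_spec : Claim_equal_fix_bracket_mismatches := by
  intro content _
  unfold Spec_fix_bracket_mismatches fix_bracket_mismatches fix_bracket_mismatches_alt
  simp only [PySem.Chars.split?, List.isEmpty, splitOn_eq_split1]
  rw [a_fold_eq_procL, b_fold_eq_procP]
  simp [procL_eq_procP]
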